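-- pv_equiv track=rewrite | github.com/satrio1256/text_simplification_project | SyntacticSimplifier.py | detokenize_strings
-- ===== SOURCE A (Python) =====
-- def detokenize_strings(tagged_tokenized):
--     sentences = ""
--     for idx, val in enumerate(tagged_tokenized):
--         next_token = None
--
--         if idx+1 < len(tagged_tokenized):
--             next_token = tagged_tokenized[idx+1]
--
--         if next_token is None or next_token[0] is "." or next_token[0] is ",":
--             sentences += val[0]
--         else:
--             sentences += val[0] + " "
--     return sentences
-- ===== SOURCE B (Python) =====
-- def detokenize_strings(tagged_tokenized):
--     parts = []
--     for word, _tag in tagged_tokenized: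
--         if parts and word not in (".", ","):
--             parts.append(" ")
--         parts.append(word)
--     return "".join(parts)
-- ===== Notes on version B (the rewrite author's own statement) =====
-- stated objective: simpler
-- what changed: Replace A's look-ahead at the NEXT token (index peek tagged_tokenized[idx+1]) and repeated string concatenation with a look-behind pass: collect parts in a list, prepend a space before the current word unless it is '.' or ',' or the first token, and ''.join at the end.
import Mathlib
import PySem

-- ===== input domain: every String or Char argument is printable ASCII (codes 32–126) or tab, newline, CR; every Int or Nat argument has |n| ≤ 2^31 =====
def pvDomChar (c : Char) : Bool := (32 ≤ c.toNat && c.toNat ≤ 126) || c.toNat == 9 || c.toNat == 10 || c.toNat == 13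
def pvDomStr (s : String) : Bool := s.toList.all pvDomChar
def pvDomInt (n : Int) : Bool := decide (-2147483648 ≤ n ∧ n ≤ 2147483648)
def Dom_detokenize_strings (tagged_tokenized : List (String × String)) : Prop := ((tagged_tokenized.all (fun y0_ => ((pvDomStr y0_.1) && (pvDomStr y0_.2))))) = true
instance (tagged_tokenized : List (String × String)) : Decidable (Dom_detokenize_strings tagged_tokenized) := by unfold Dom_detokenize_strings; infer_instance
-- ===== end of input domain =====

-- B joins a parts list built look-behind instead of A's look-ahead peek with string +=; return values proved equal on all inputs.

-- ===== PORT A =====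
-- literal port of A: fold over enumerate, peeking at the token after the current index
def detokenize_strings (tagged_tokenized : List (String × String)) : String :=
  (PySem.List.enumerate tagged_tokenized).foldl
    (fun sentences p =>
      let next_token : Option (String × String) :=
        if p.1 + 1 < (tagged_tokenized.length : Int) then
          PySem.List.pyGet? tagged_tokenized (p.1 + 1)
        else none
      match next_token with
      | none => sentences ++ p.2.1
      | some nt =>
          if nt.1 = "." ∨ nt.1 = "," then sentences ++ p.2.1
          else sentences ++ p.2.1 ++ " ")
    ""

-- ===== PORT B =====
-- literal port of B: build a parts list, space before the current word unless first or '.'/',' , join at the end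
def detokenize_strings_alt (tagged_tokenized : List (String × String)) : String :=
  String.join
    (tagged_tokenized.foldl
      (fun parts p =>
        let parts := if parts ≠ [] ∧ p.1 ≠ "." ∧ p.1 ≠ "," then parts ++ [" "] else parts
        parts ++ [p.1])
      [])

-- ===== PRECONDITION & SPEC =====
def Spec_detokenize_strings (tagged_tokenized : List (String × String)) (out : String) : Prop := out = detokenize_strings_alt tagged_tokenized
instance (tagged_tokenized : List (String × String)) (out : String) : Decidable (Spec_detokenize_strings tagged_tokenized out) := by unfold Spec_detokenize_strings; infer_instance

-- ===== CLAIM (what is proved, stated in full; the proofs are below) =====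
def Claim_equal_detokenize_strings : Prop := ∀ (tagged_tokenized : List (String × String)), Dom_detokenize_strings tagged_tokenized → Spec_detokenize_strings tagged_tokenized (detokenize_strings tagged_tokenized)

-- ===== LEMMAS AND PROOFS =====

-- separator placed before word w (empty for '.' and ',')
def pvSep (w : String) : String := if w = "." ∨ w = "," then "" else " "

-- the string contributed by every token after the first
def pvTail : List (String × String) → String
  | [] => ""
  | t :: rest => pvSep t.1 ++ (t.1 ++ pvTail rest)

-- the intended detokenization
def pvDetok : List (String × String) → String
  | [] => ""
  | v :: rest => v.1 ++ pvTail rest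

lemma A_go (suf pre : List (String × String)) (s : String) :
    (PySem.List.enumerate suf (pre.length : Int)).foldl
      (fun sentences p =>
        let next_token : Option (String × String) :=
          if p.1 + 1 < ((pre ++ suf).length : Int) then
            PySem.List.pyGet? (pre ++ suf) (p.1 + 1)
          else none
        match next_token with
        | none => sentences ++ p.2.1
        | some nt =>
            if nt.1 = "." ∨ nt.1 = "," then sentences ++ p.2.1
            else sentences ++ p.2.1 ++ " ")
      s
    = s ++ pvDetok suf := by
  induction suf generalizing pre s with
  | nil => simp [pvDetok]
  | cons x suf' ih =>
    rw [PySem.List.enumerate_cons]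
    cases suf' with
    | nil =>
      simp [pvDetok, pvTail]
    | cons y rest =>
      have hlt : (pre.length : Int) + 1 < ((pre ++ x :: y :: rest).length : Int) := by
        simp
      have hget : PySem.List.pyGet? (pre ++ x :: y :: rest) ((pre.length : Int) + 1)
          = some y := by
        have : (pre ++ x :: y :: rest) = (pre ++ [x]) ++ y :: rest := by simp
        rw [this]
        have hl : ((pre.length : Int) + 1) = (((pre ++ [x]).length : Nat) : Int) := by
          simp
        rw [hl, PySem.List.pyGet?_append_length]
      have hpre : ((pre.length : Int) + 1) = (((pre ++ [x]).length : Nat) : Int) := by simp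
      simp only [List.foldl_cons, hlt, if_pos, hget]
      rw [hpre]
      have := ih (pre := pre ++ [x])
        (s := if y.1 = "." ∨ y.1 = "," then s ++ x.1 else s ++ x.1 ++ " ")
      simp only [List.append_assoc, List.cons_append, List.nil_append] at this ⊢
      rw [this]
      by_cases hy : y.1 = "." ∨ y.1 = ","
      · simp [hy, pvDetok, pvTail, pvSep, String.append_assoc]
      · simp [hy, pvDetok, pvTail, pvSep, String.append_assoc]

lemma B_go (ts : List (String × String)) (parts : List String) :
    String.join
      (ts.foldl
        (fun parts p =>
          let parts := if parts ≠ [] ∧ p.1 ≠ "." ∧ p.1 ≠ "," then parts ++ [" "] else parts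
          parts ++ [p.1])
        parts)
    = String.join parts ++ (if parts = [] then pvDetok ts else pvTail ts) := by
  induction ts generalizing parts with
  | nil => cases parts <;> simp [pvDetok, pvTail]
  | cons t rest ih =>
    by_cases hp : parts = []
    · subst hp
      simp only [List.foldl_cons]
      rw [ih]
      have hne : ([t.1] : List String) ≠ [] := by simp
      simp [hne, pvDetok, String.join]
    · by_cases ht : t.1 = "." ∨ t.1 = ","
      · have hcond : ¬ (parts ≠ [] ∧ t.1 ≠ "." ∧ t.1 ≠ ",") := by tauto
        simp only [List.foldl_cons, if_neg hcond]
        rw [ih]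
        have hne : parts ++ [t.1] ≠ [] := by simp
        simp only [if_neg hne, if_neg hp]
        simp [pvTail, pvSep, ht, String.join, String.append_assoc]
      · have hcond : (parts ≠ [] ∧ t.1 ≠ "." ∧ t.1 ≠ ",") := by tauto
        simp only [List.foldl_cons, if_pos hcond]
        rw [ih]
        simp only [if_neg hp, if_neg (by simp : ¬ (parts ++ [" "]) ++ [t.1] = [])]
        simp [pvTail, pvSep, ht, String.join, String.append_assoc]

lemma A_eq_detok (ts : List (String × String)) : detokenize_strings ts = pvDetok ts := by
  have := A_go ts [] ""
  simpa [detokenize_strings, PySem.List.enumerate] using this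

lemma B_eq_detok (ts : List (String × String)) : detokenize_strings_alt ts = pvDetok ts := by
  have := B_go ts []
  simpa [detokenize_strings_alt, String.join] using this

-- ===== VERDICT (by name: the statement is the Claim_ definition above) =====
theorem detokenize_strings_spec : Claim_equal_detokenize_strings := by
  intro ts _
  unfold Spec_detokenize_strings
  rw [A_eq_detok, B_eq_detok]
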